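-- pv_equiv track=rewrite | github.com/shaunak24/dsa-practice | autodesk_round_1/min_platforms.py | max_platforms
-- ===== SOURCE A (Python) =====
-- def max_platforms(arr, dep):
--     max_trains = 0
--     for i in range(len(arr)):
--         max_tmp = 0
--         for j in range(len(dep)):
--             if dep[i] > arr[j] and dep[i] < dep[j]:
--                 max_tmp += 1
--         if max_tmp > max_trains:
--             max_trains = max_tmp
--     return max_trains
-- ===== SOURCE B (Python) =====
-- def _search(xs, t, strict):
--     # binary search on sorted xs: number of elements x with x < t (strict) / x <= t (not strict)
--     lo, hi = 0, len(xs)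
--     while lo < hi:
--         mid = (lo + hi) // 2
--         if (xs[mid] < t) if strict else (xs[mid] <= t):
--             lo = mid + 1
--         else:
--             hi = mid
--     return lo
--
--
-- def max_platforms(arr, dep):
--     # intervals with arr[j] >= dep[j] can never strictly contain a point, drop them;
--     # then #(j : arr[j] < t < dep[j]) = #(arr[j] < t) - #(dep[j] <= t), each by binary search
--     starts = sorted(a for a, d in zip(arr, dep) if a < d)
--     ends = sorted(d for a, d in zip(arr, dep) if a < d)
--     best = 0
--     for t in dep:
--         inside = _search(starts, t, True) - _search(ends, t, False)
--         if inside > best: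
--             best = inside
--     return best
-- ===== Notes on version B (the rewrite author's own statement) =====
-- stated objective: faster
-- what changed: Replaces A's O(n^2) double loop (for each departure time, rescan all intervals) by sorting the interval starts and ends once and computing each count #(start < t) - #(end <= t) with a hand-written binary search.
import Mathlib
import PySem

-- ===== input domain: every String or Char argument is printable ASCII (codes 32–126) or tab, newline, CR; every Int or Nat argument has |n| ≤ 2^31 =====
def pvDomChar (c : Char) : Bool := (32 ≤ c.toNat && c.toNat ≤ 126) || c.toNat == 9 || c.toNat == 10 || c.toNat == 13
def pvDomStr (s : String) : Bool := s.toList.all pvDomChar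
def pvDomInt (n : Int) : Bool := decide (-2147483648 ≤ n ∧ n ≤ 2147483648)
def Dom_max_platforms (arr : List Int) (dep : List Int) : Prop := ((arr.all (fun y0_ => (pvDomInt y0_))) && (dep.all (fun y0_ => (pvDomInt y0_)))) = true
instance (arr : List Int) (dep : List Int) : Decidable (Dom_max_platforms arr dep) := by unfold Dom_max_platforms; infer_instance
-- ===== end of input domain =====

-- B replaces A's quadratic double loop by sorting the (start < end) intervals once and
-- binary-searching, per departure time t, the counts #(start < t) and #(end ≤ t); faster (asymptotic).

-- ===== PORT A =====
def max_platforms (arr : List Int) (dep : List Int) : Int :=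
  (PySem.List.pyRange 0 (PySem.List.len arr) 1).foldl (fun max_trains i =>
    let max_tmp : Int :=
      (PySem.List.pyRange 0 (PySem.List.len dep) 1).foldl (fun max_tmp j =>
        if PySem.List.pyGetD dep i 0 > PySem.List.pyGetD arr j 0 ∧
           PySem.List.pyGetD dep i 0 < PySem.List.pyGetD dep j 0
        then max_tmp + 1 else max_tmp) 0
    if max_tmp > max_trains then max_tmp else max_trains) 0

-- ===== PORT B =====
-- the while-loop of Source B's _search (lo, hi stay in [0, len xs], so Nat indices are exact)
def pvSearchLoop (xs : List Int) (t : Int) (strict : Bool) (lo hi : Nat) : Nat :=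
  if _h : lo < hi then
    let mid := (lo + hi) / 2
    if (if strict then PySem.List.pyGetD xs (mid : Int) 0 < t
        else PySem.List.pyGetD xs (mid : Int) 0 ≤ t)
    then pvSearchLoop xs t strict (mid + 1) hi
    else pvSearchLoop xs t strict lo mid
  else lo
termination_by hi - lo
decreasing_by all_goals omega

def pvSearch (xs : List Int) (t : Int) (strict : Bool) : Nat :=
  pvSearchLoop xs t strict 0 xs.length

def max_platforms_alt (arr : List Int) (dep : List Int) : Int :=
  let pairs := (arr.zip dep).filter (fun p => p.1 < p.2)
  let starts := PySem.List.sorted (pairs.map Prod.fst) (fun x => x) false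
  let ends := PySem.List.sorted (pairs.map Prod.snd) (fun x => x) false
  dep.foldl (fun best t =>
    let inside : Int := (pvSearch starts t true : Int) - (pvSearch ends t false : Int)
    if inside > best then inside else best) 0

-- ===== PRECONDITION & SPEC =====
-- A indexes dep[i] for i < len(arr) and arr[j] for j < len(dep) (both only when both loops
-- run): with arr and dep nonempty of unequal lengths it raises IndexError; exactly those
-- inputs are excluded.
def Pre_max_platforms (arr : List Int) (dep : List Int) : Prop :=
  arr = [] ∨ dep = [] ∨ arr.length = dep.length
instance (arr : List Int) (dep : List Int) : Decidable (Pre_max_platforms arr dep) := by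
  unfold Pre_max_platforms; infer_instance

def pvWitness_max_platforms : List Int × List Int := ([1, 2, 3], [4, 5, 6])

def Spec_max_platforms (arr : List Int) (dep : List Int) (out : Int) : Prop := out = max_platforms_alt arr dep
instance (arr : List Int) (dep : List Int) (out : Int) : Decidable (Spec_max_platforms arr dep out) := by unfold Spec_max_platforms; infer_instance

-- ===== CLAIM (what is proved, stated in full; the proofs are below) =====
def Claim_equal_max_platforms : Prop := ∀ (arr : List Int) (dep : List Int), Dom_max_platforms arr dep → Pre_max_platforms arr dep → Spec_max_platforms arr dep (max_platforms arr dep)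

-- ===== LEMMAS AND PROOFS =====

-- if xs looks like p-elements strictly before index r and ¬p-elements from r on, countP p = r
lemma pv_countP_split (p : Int → Bool) :
    ∀ (xs : List Int) (r : Nat), r ≤ xs.length →
    (∀ j (hj : j < xs.length), j < r → p xs[j]) →
    (∀ j (hj : j < xs.length), r ≤ j → ¬ p xs[j]) →
    xs.countP p = r := by
  intro xs
  induction xs with
  | nil => intro r hr _ _; simp at hr ⊢; omega
  | cons x xs ih =>
    intro r hr h1 h2
    cases r with
    | zero =>
      have hx : ¬ p x := by simpa using h2 0 (by simp) (by omega)
      have : xs.countP p = 0 := by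
        apply ih 0 (by omega)
        · intro j hj hj0; omega
        · intro j hj _; simpa using h2 (j+1) (by simpa using hj) (by omega)
      simp [List.countP_cons, this, hx]
    | succ r' =>
      have hx : p x := by simpa using h1 0 (by simp) (by omega)
      have : xs.countP p = r' := by
        apply ih r' (by simpa using hr)
        · intro j hj hj'; simpa using h1 (j+1) (by simpa using hj) (by omega)
        · intro j hj hj'; simpa using h2 (j+1) (by simpa using hj) (by omega)
      simp [List.countP_cons, this, hx]

-- the binary-search loop on a sorted list lands on the split point = countP
lemma pvSearchLoop_eq (xs : List Int) (t : Int) (strict : Bool)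
    (hs : ∀ i j (hi : i < xs.length) (hj : j < xs.length), i ≤ j → xs[i] ≤ xs[j]) :
    ∀ n lo hi, hi - lo ≤ n → lo ≤ hi → hi ≤ xs.length →
    (∀ j (hj : j < xs.length), j < lo → (if strict then xs[j] < t else xs[j] ≤ t)) →
    (∀ j (hj : j < xs.length), hi ≤ j → ¬ (if strict then xs[j] < t else xs[j] ≤ t)) →
    pvSearchLoop xs t strict lo hi
      = xs.countP (fun x => if strict then decide (x < t) else decide (x ≤ t)) := by
  intro n
  induction n with
  | zero =>
    intro lo hi hfuel hlh hhl h1 h2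
    have : lo = hi := by omega
    subst this
    rw [pvSearchLoop]
    simp only [lt_irrefl, dite_false]
    exact (pv_countP_split _ xs lo hhl
      (by intro j hj hjr; have := h1 j hj hjr; cases strict <;> simpa using this)
      (by intro j hj hjr; have := h2 j hj hjr; cases strict <;> simpa using this)).symm
  | succ n ih =>
    intro lo hi hfuel hlh hhl h1 h2
    by_cases hlt : lo < hi
    · rw [pvSearchLoop]
      simp only [hlt, dite_true]
      have hmid1 : lo ≤ (lo + hi) / 2 := by omega
      have hmid2 : (lo + hi) / 2 < hi := by omega
      have hmlen : (lo + hi) / 2 < xs.length := by omega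
      have hget : PySem.List.pyGetD xs (((lo + hi) / 2 : Nat) : Int) 0 = xs[(lo + hi) / 2] := by
        rw [PySem.List.pyGetD_natCast]; exact List.getD_eq_getElem _ _ hmlen
      by_cases hc : (if strict then xs[(lo + hi) / 2] < t else xs[(lo + hi) / 2] ≤ t)
      · have hc' : (if strict then PySem.List.pyGetD xs (((lo + hi) / 2 : Nat) : Int) 0 < t
            else PySem.List.pyGetD xs (((lo + hi) / 2 : Nat) : Int) 0 ≤ t) := by
          rw [hget]; exact hc
        simp only [hc', if_true]
        apply ih ((lo + hi) / 2 + 1) hi (by omega) (by omega) hhl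
        · intro j hj hjr
          have hle : xs[j] ≤ xs[(lo + hi) / 2] := hs j _ hj hmlen (by omega)
          cases strict with
          | true => simp at hc ⊢; omega
          | false => simp at hc ⊢; omega
        · exact h2
      · have hc' : ¬ (if strict then PySem.List.pyGetD xs (((lo + hi) / 2 : Nat) : Int) 0 < t
            else PySem.List.pyGetD xs (((lo + hi) / 2 : Nat) : Int) 0 ≤ t) := by
          rw [hget]; exact hc
        simp only [hc', if_false]
        apply ih lo ((lo + hi) / 2) (by omega) (by omega) (by omega) h1
        · intro j hj hjr
          have hle : xs[(lo + hi) / 2] ≤ xs[j] := hs _ j hmlen hj (by omega)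
          cases strict with
          | true => simp at hc ⊢; omega
          | false => simp at hc ⊢; omega
    · exact ih lo hi (by omega) hlh hhl h1 h2

lemma pvSearch_eq (xs : List Int) (t : Int) (strict : Bool)
    (hs : List.Pairwise (· ≤ ·) xs) :
    pvSearch xs t strict
      = xs.countP (fun x => if strict then decide (x < t) else decide (x ≤ t)) := by
  have hs' := List.pairwise_iff_getElem.mp hs
  apply pvSearchLoop_eq xs t strict
  · intro i j hi hj hij
    rcases Nat.lt_or_ge i j with h | h
    · exact hs' i j hi hj h
    · have hij' : i = j := by omega
      subst hij'; exact le_rfl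
  · exact Nat.le_refl _
  · omega
  · exact Nat.le_refl _
  · intro j hj hj0; omega
  · intro j hj hjl; omega

lemma pvSearch_lt (xs : List Int) (t : Int) (hs : List.Pairwise (· ≤ ·) xs) :
    pvSearch xs t true = xs.countP (fun x => decide (x < t)) := by
  rw [pvSearch_eq xs t true hs]; simp

lemma pvSearch_le (xs : List Int) (t : Int) (hs : List.Pairwise (· ≤ ·) xs) :
    pvSearch xs t false = xs.countP (fun x => decide (x ≤ t)) := by
  rw [pvSearch_eq xs t false hs]; simp

-- for interval pairs with fst < snd: #(fst < t) = #(fst < t ∧ t < snd) + #(snd ≤ t)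
lemma pv_count_identity (t : Int) :
    ∀ (l : List (Int × Int)), (∀ p ∈ l, p.1 < p.2) →
    (l.map Prod.fst).countP (fun x => decide (x < t))
      = l.countP (fun p => decide (p.1 < t) && decide (t < p.2))
        + (l.map Prod.snd).countP (fun x => decide (x ≤ t)) := by
  intro l
  induction l with
  | nil => simp
  | cons p l ih =>
    intro h
    have hp : p.1 < p.2 := h p (by simp)
    have ih' := ih (fun q hq => h q (by simp [hq]))
    simp only [List.map_cons, List.countP_cons, ih']
    by_cases h1 : p.1 < t <;> by_cases h2 : t < p.2 <;> by_cases h3 : p.2 ≤ t <;>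
      simp [h1, h2, h3] <;> omega

-- counting the inside-predicate over all pairs = over the (fst < snd)-filtered pairs
lemma pv_count_filter (t : Int) (l : List (Int × Int)) :
    (l.filter (fun p => decide (p.1 < p.2))).countP (fun p => decide (p.1 < t) && decide (t < p.2))
      = l.countP (fun p => decide (p.1 < t) && decide (t < p.2)) := by
  induction l with
  | nil => simp
  | cons p l ih =>
    by_cases hp : p.1 < p.2
    · by_cases h1 : p.1 < t <;> by_cases h2 : t < p.2 <;>
        simp [List.filter_cons, List.countP_cons, hp, h1, h2, ih]
    · have h12 : ¬ (p.1 < t ∧ t < p.2) := by omega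
      by_cases h1 : p.1 < t <;> by_cases h2 : t < p.2 <;>
        simp [List.filter_cons, List.countP_cons, hp, h1, h2, ih] <;> omega

-- B's per-point value is the number of zip pairs strictly containing t
lemma pv_inside_eq (arr dep : List Int) (t : Int) :
    (pvSearch (PySem.List.sorted (((arr.zip dep).filter (fun p => p.1 < p.2)).map Prod.fst) (fun x => x) false) t true : Int)
      - (pvSearch (PySem.List.sorted (((arr.zip dep).filter (fun p => p.1 < p.2)).map Prod.snd) (fun x => x) false) t false : Int)
      = ((arr.zip dep).countP (fun p => decide (p.1 < t) && decide (t < p.2)) : Int) := by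
  set pairs := (arr.zip dep).filter (fun p => p.1 < p.2) with hpairs
  have hmem : ∀ p ∈ pairs, p.1 < p.2 := by
    intro p hp
    have := List.of_mem_filter hp
    simpa using this
  have hsortS : List.Pairwise (· ≤ ·)
      (PySem.List.sorted (pairs.map Prod.fst) (fun x => x) false) := by
    have := PySem.List.sorted_pairwise (pairs.map Prod.fst) (fun x => x)
    simpa using this
  have hsortE : List.Pairwise (· ≤ ·)
      (PySem.List.sorted (pairs.map Prod.snd) (fun x => x) false) := by
    have := PySem.List.sorted_pairwise (pairs.map Prod.snd) (fun x => x)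
    simpa using this
  rw [pvSearch_lt _ _ hsortS, pvSearch_le _ _ hsortE]
  rw [(PySem.List.sorted_perm (pairs.map Prod.fst) (fun x => x) false).countP_eq,
      (PySem.List.sorted_perm (pairs.map Prod.snd) (fun x => x) false).countP_eq]
  have hid := pv_count_identity t pairs hmem
  have hfil := pv_count_filter t (arr.zip dep)
  rw [← hpairs] at hfil
  omega

-- A's inner loop counts the zip pairs strictly containing t (equal lengths)
lemma pv_inner_eq (arr dep : List Int) (hlen : arr.length = dep.length) (t : Int) :
    (PySem.List.pyRange 0 (PySem.List.len dep) 1).foldl (fun m j =>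
        if t > PySem.List.pyGetD arr j 0 ∧ t < PySem.List.pyGetD dep j 0
        then m + 1 else m) (0 : Int)
      = ((arr.zip dep).countP (fun p => decide (p.1 < t) && decide (t < p.2)) : Int) := by
  have hzlen : (arr.zip dep).length = dep.length := by
    simp [List.length_zip, hlen]
  have hcong : (PySem.List.pyRange 0 (PySem.List.len dep) 1).foldl (fun m j =>
        if t > PySem.List.pyGetD arr j 0 ∧ t < PySem.List.pyGetD dep j 0
        then m + 1 else m) (0 : Int)
      = (PySem.List.pyRange 0 (PySem.List.len (arr.zip dep)) 1).foldl (fun m j =>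
        if (PySem.List.pyGetD (arr.zip dep) j (0, 0)).1 < t ∧ t < (PySem.List.pyGetD (arr.zip dep) j (0, 0)).2
        then m + 1 else m) (0 : Int) := by
    rw [show PySem.List.len dep = PySem.List.len (arr.zip dep) by simp [PySem.List.len_eq, hzlen]]
    apply PySem.List.foldl_congr_mem
    intro acc j hj
    have hj' := (PySem.List.mem_pyRange_one).mp hj
    have hjlen : j.toNat < (arr.zip dep).length := by
      simp [PySem.List.len_eq] at hj'; omega
    have h0 : (0:Int) ≤ j := hj'.1
    have hga : PySem.List.pyGetD arr j 0 = arr[j.toNat]'(by simp [List.length_zip] at hjlen; omega) :=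
      PySem.List.pyGetD_eq_getElem arr 0 h0 (by simp [List.length_zip] at hjlen; omega)
    have hgd : PySem.List.pyGetD dep j 0 = dep[j.toNat]'(by simp [List.length_zip] at hjlen; omega) :=
      PySem.List.pyGetD_eq_getElem dep 0 h0 (by simp [List.length_zip] at hjlen; omega)
    have hgz : PySem.List.pyGetD (arr.zip dep) j (0, 0) = (arr.zip dep)[j.toNat]'hjlen :=
      PySem.List.pyGetD_eq_getElem (arr.zip dep) (0, 0) h0 (by omega)
    rw [hga, hgd, hgz]
    simp [List.getElem_zip]
  rw [hcong]
  rw [PySem.List.foldl_pyRange_zero_pyGetD (arr.zip dep) (0,0)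
        (fun m p => if p.1 < t ∧ t < p.2 then m + 1 else m) 0]
  rw [PySem.List.foldl_ite_add_one]
  simp

-- a fold that never raises the running maximum above 0 stays at 0
lemma pv_foldl_zero (f : Int → Int → Int) (h : ∀ t, f 0 t = 0) :
    ∀ l : List Int, l.foldl f 0 = 0 := by
  intro l
  induction l with
  | nil => rfl
  | cons x l ih => simp only [List.foldl_cons, h x, ih]

-- ===== VERDICT (by name: the statement is the Claim_ definition above) =====
theorem max_platforms_spec : Claim_equal_max_platforms := by
  intro arr dep _hdom hpre
  unfold Spec_max_platforms max_platforms max_platforms_alt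
  rcases hpre with hnil | hdnil | hlen
  · subst hnil
    simp only [PySem.List.len_eq, List.length_nil, List.zip_nil_left, List.filter_nil,
      List.map_nil]
    rw [show PySem.List.pyRange 0 ((0:Nat):Int) 1 = [] from by
      simp [PySem.List.pyRange_one_eq_nil]]
    simp only [List.foldl_nil]
    have hemp : PySem.List.sorted ([] : List Int) (fun x => x) false = [] := by
      simpa using (PySem.List.sorted_perm ([] : List Int) (fun x => x) false).eq_nil
    refine (pv_foldl_zero _ ?_ dep).symm
    intro t
    rw [hemp]
    simp [pvSearch, pvSearchLoop]
  · -- dep = []: the inner loop is empty, A's maximum stays 0; B folds over the empty dep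
    subst hdnil
    simp only [PySem.List.len_eq, List.length_nil, List.foldl_nil]
    rw [show PySem.List.pyRange 0 ((0:Nat):Int) 1 = [] from by
      simp [PySem.List.pyRange_one_eq_nil]]
    simp only [List.foldl_nil]
    apply pv_foldl_zero
    intro t
    simp
  · -- equal lengths: both sides fold the same per-departure maximum over dep
    rw [show PySem.List.len arr = PySem.List.len dep by simp [PySem.List.len_eq, hlen]]
    rw [PySem.List.foldl_pyRange_zero_pyGetD dep 0
      (fun max_trains t =>
        let max_tmp : Int :=
          (PySem.List.pyRange 0 (PySem.List.len dep) 1).foldl (fun m j =>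
            if t > PySem.List.pyGetD arr j 0 ∧ t < PySem.List.pyGetD dep j 0
            then m + 1 else m) 0
        if max_tmp > max_trains then max_tmp else max_trains) 0]
    apply PySem.List.foldl_congr_mem
    intro acc t _ht
    simp only []
    rw [pv_inner_eq arr dep hlen t, ← pv_inside_eq arr dep t]
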